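-- pv_equiv track=rewrite | github.com/CrossfellAB/PJ-Auto-Script | patient_journey_builder/output/markdown_exporter.py | _format_named_entities
-- ===== SOURCE A (Python) =====
-- from typing import Union, List, Dict, Any, Optional
--
-- def _format_named_entities(entities: Dict[str, List[Dict]]) -> List[str]:
--     """Format named entities section."""
--     lines = []
--
--     lines.append("## Named Entities Identified")
--     lines.append("")
--
--     # KOLs
--     if entities.get('kols'):
--         lines.append("### Key Opinion Leaders")
--         lines.append("")
--         lines.append("| Name | Institution | Role | Expertise |")
--         lines.append("|------|-------------|------|-----------|")
--         for kol in entities['kols']: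
--             name = _escape_pipe(str(kol.get('name', '')))
--             inst = _escape_pipe(str(kol.get('institution', '')))
--             role = _escape_pipe(str(kol.get('role', kol.get('position', ''))))
--             expertise = _escape_pipe(str(kol.get('expertise', kol.get('specialty', ''))))
--             lines.append(f"| {name} | {inst} | {role} | {expertise} |")
--         lines.append("")
--
--     # Institutions
--     if entities.get('institutions'):
--         lines.append("### Institutions")
--         lines.append("")
--         lines.append("| Name | Location | Type | Specialization |")
--         lines.append("|------|----------|------|----------------|")
--         for inst in entities['institutions']:
--             name = _escape_pipe(str(inst.get('name', '')))
--             loc = _escape_pipe(str(inst.get('location', '')))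
--             inst_type = _escape_pipe(str(inst.get('type', '')))
--             spec = _escape_pipe(str(inst.get('specialization', '')))
--             lines.append(f"| {name} | {loc} | {inst_type} | {spec} |")
--         lines.append("")
--
--     # Payer Bodies
--     if entities.get('payer_bodies'):
--         lines.append("### Payer Bodies")
--         lines.append("")
--         lines.append("| Organization | Role | Key Decisions |")
--         lines.append("|--------------|------|---------------|")
--         for payer in entities['payer_bodies']:
--             name = _escape_pipe(str(payer.get('name', '')))
--             role = _escape_pipe(str(payer.get('role', '')))
--             decisions = _escape_pipe(str(payer.get('decisions', '')))
--             lines.append(f"| {name} | {role} | {decisions} |")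
--         lines.append("")
--
--     # Professional Societies
--     if entities.get('professional_societies'):
--         lines.append("### Professional Societies")
--         lines.append("")
--         lines.append("| Organization | Abbreviation | Focus |")
--         lines.append("|--------------|--------------|-------|")
--         for soc in entities['professional_societies']:
--             name = _escape_pipe(str(soc.get('name', '')))
--             abbr = _escape_pipe(str(soc.get('abbreviation', '')))
--             focus = _escape_pipe(str(soc.get('focus', '')))
--             lines.append(f"| {name} | {abbr} | {focus} |")
--         lines.append("")
--
--     # Patient Organizations
--     if entities.get('patient_organizations'):
--         lines.append("### Patient Organizations")
--         lines.append("")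
--         lines.append("| Organization | Focus | Activities |")
--         lines.append("|--------------|-------|------------|")
--         for org in entities['patient_organizations']:
--             name = _escape_pipe(str(org.get('name', '')))
--             focus = _escape_pipe(str(org.get('focus', '')))
--             activities = _escape_pipe(str(org.get('activities', '')))
--             lines.append(f"| {name} | {focus} | {activities} |")
--         lines.append("")
--
--     return lines
--
-- def _escape_pipe(text: str) -> str:
--     """Escape pipe characters for markdown tables."""
--     return text.replace("|", "\\|").replace("\n", " ")
-- ===== SOURCE B (Python) =====
-- def _escape_pipe(text: str) -> str:
--     return text.replace("|", "\\|").replace("\n", " ")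
--
-- # one entry per section: entities-key, heading, header row, separator row,
-- # and per column the candidate dict-keys tried in order (first present wins)
-- _SECTIONS = [
--     ("kols", "### Key Opinion Leaders",
--      "| Name | Institution | Role | Expertise |",
--      "|------|-------------|------|-----------|",
--      [("name",), ("institution",), ("role", "position"), ("expertise", "specialty")]),
--     ("institutions", "### Institutions",
--      "| Name | Location | Type | Specialization |",
--      "|------|----------|------|----------------|",
--      [("name",), ("location",), ("type",), ("specialization",)]),
--     ("payer_bodies", "### Payer Bodies",
--      "| Organization | Role | Key Decisions |",
--      "|--------------|------|---------------|",
--      [("name",), ("role",), ("decisions",)]),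
--     ("professional_societies", "### Professional Societies",
--      "| Organization | Abbreviation | Focus |",
--      "|--------------|--------------|-------|",
--      [("name",), ("abbreviation",), ("focus",)]),
--     ("patient_organizations", "### Patient Organizations",
--      "| Organization | Focus | Activities |",
--      "|--------------|-------|------------|",
--      [("name",), ("focus",), ("activities",)]),
-- ]
--
-- def _format_named_entities(entities):
--     # Build the whole section as ONE markdown string, then split it into lines
--     # at the very end.  Escaped cells never contain a newline, so the split
--     # reconstructs exactly the line list.
--     text = "## Named Entities Identified\n"
--     for key, heading, header, sep, cols in _SECTIONS:
--         rows = entities.get(key)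
--         if rows:
--             text += "\n" + heading + "\n\n" + header + "\n" + sep
--             for row in rows:
--                 cells = [_escape_pipe(str(next((row[k] for k in ks if k in row), "")))
--                          for ks in cols]
--                 text += "\n| " + " | ".join(cells) + " |"
--             text += "\n"
--     return text.split("\n")
-- ===== Notes on version B (the rewrite author's own statement) =====
-- stated objective: alternative
-- what changed: B accumulates the whole section as one markdown string (driven by a list of section configs with per-column candidate keys) and splits it on newlines once at the end, instead of A's five unrolled blocks appending to a line list.
import Mathlib
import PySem

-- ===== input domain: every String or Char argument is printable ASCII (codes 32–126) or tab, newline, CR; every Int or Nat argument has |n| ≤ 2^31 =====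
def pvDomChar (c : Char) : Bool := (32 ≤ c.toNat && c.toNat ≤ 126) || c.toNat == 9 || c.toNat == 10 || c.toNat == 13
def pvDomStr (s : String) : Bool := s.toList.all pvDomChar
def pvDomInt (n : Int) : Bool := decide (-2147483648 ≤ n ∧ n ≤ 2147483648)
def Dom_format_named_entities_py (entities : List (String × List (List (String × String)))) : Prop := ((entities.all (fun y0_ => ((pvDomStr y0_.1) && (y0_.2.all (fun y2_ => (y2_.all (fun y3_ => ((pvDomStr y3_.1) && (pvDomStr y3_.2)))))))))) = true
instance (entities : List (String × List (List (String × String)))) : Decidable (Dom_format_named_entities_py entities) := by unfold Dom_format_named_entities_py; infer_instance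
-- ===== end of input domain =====

-- B builds the whole section as ONE markdown string (string accumulation) and splits it
-- into lines once at the end, instead of A's five unrolled list-appending blocks (objective: alternative).


-- shared module helper _escape_pipe (used verbatim by both Pythons)
def escapePipe (t : String) : String :=
  PySem.Str.replace (PySem.Str.replace t "|" "\\|") "\n" " "

-- ===== PORT A =====
-- d.get(k, dflt) on the association-list dict
def aGet (d : List (String × String)) (k dflt : String) : String :=
  (PySem.Dict.mk d).getD k dflt

def format_named_entities_py (entities : List (String × List (List (String × String)))) : List String :=
  let ed := PySem.Dict.mk entities
  let lines : List String := ["## Named Entities Identified", ""]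
  -- KOLs
  let lines :=
    if ed.getD "kols" [] ≠ [] then
      ((ed.getD "kols" []).foldl (fun acc kol =>
        let name := escapePipe (aGet kol "name" "")
        let inst := escapePipe (aGet kol "institution" "")
        let role := escapePipe (aGet kol "role" (aGet kol "position" ""))
        let expertise := escapePipe (aGet kol "expertise" (aGet kol "specialty" ""))
        acc ++ ["| " ++ name ++ " | " ++ inst ++ " | " ++ role ++ " | " ++ expertise ++ " |"])
        (lines ++ ["### Key Opinion Leaders", "", "| Name | Institution | Role | Expertise |", "|------|-------------|------|-----------|"])) ++ [""]
    else lines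
  -- Institutions
  let lines :=
    if ed.getD "institutions" [] ≠ [] then
      ((ed.getD "institutions" []).foldl (fun acc inst =>
        let name := escapePipe (aGet inst "name" "")
        let loc := escapePipe (aGet inst "location" "")
        let instType := escapePipe (aGet inst "type" "")
        let spec := escapePipe (aGet inst "specialization" "")
        acc ++ ["| " ++ name ++ " | " ++ loc ++ " | " ++ instType ++ " | " ++ spec ++ " |"])
        (lines ++ ["### Institutions", "", "| Name | Location | Type | Specialization |", "|------|----------|------|----------------|"])) ++ [""]
    else lines
  -- Payer Bodies
  let lines :=
    if ed.getD "payer_bodies" [] ≠ [] then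
      ((ed.getD "payer_bodies" []).foldl (fun acc payer =>
        let name := escapePipe (aGet payer "name" "")
        let role := escapePipe (aGet payer "role" "")
        let decisions := escapePipe (aGet payer "decisions" "")
        acc ++ ["| " ++ name ++ " | " ++ role ++ " | " ++ decisions ++ " |"])
        (lines ++ ["### Payer Bodies", "", "| Organization | Role | Key Decisions |", "|--------------|------|---------------|"])) ++ [""]
    else lines
  -- Professional Societies
  let lines :=
    if ed.getD "professional_societies" [] ≠ [] then
      ((ed.getD "professional_societies" []).foldl (fun acc soc =>
        let name := escapePipe (aGet soc "name" "")
        let abbr := escapePipe (aGet soc "abbreviation" "")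
        let focus := escapePipe (aGet soc "focus" "")
        acc ++ ["| " ++ name ++ " | " ++ abbr ++ " | " ++ focus ++ " |"])
        (lines ++ ["### Professional Societies", "", "| Organization | Abbreviation | Focus |", "|--------------|--------------|-------|"])) ++ [""]
    else lines
  -- Patient Organizations
  let lines :=
    if ed.getD "patient_organizations" [] ≠ [] then
      ((ed.getD "patient_organizations" []).foldl (fun acc org =>
        let name := escapePipe (aGet org "name" "")
        let focus := escapePipe (aGet org "focus" "")
        let activities := escapePipe (aGet org "activities" "")
        acc ++ ["| " ++ name ++ " | " ++ focus ++ " | " ++ activities ++ " |"])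
        (lines ++ ["### Patient Organizations", "", "| Organization | Focus | Activities |", "|--------------|-------|------------|"])) ++ [""]
    else lines
  lines

-- ===== PORT B =====
-- section configs: entities-key, heading, header row, separator row, per-column candidate keys
def bSections : List (String × String × String × String × List (List String)) :=
  [ ("kols", "### Key Opinion Leaders",
     "| Name | Institution | Role | Expertise |",
     "|------|-------------|------|-----------|",
     [["name"], ["institution"], ["role", "position"], ["expertise", "specialty"]]),
    ("institutions", "### Institutions",
     "| Name | Location | Type | Specialization |",
     "|------|----------|------|----------------|",
     [["name"], ["location"], ["type"], ["specialization"]]),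
    ("payer_bodies", "### Payer Bodies",
     "| Organization | Role | Key Decisions |",
     "|--------------|------|---------------|",
     [["name"], ["role"], ["decisions"]]),
    ("professional_societies", "### Professional Societies",
     "| Organization | Abbreviation | Focus |",
     "|--------------|--------------|-------|",
     [["name"], ["abbreviation"], ["focus"]]),
    ("patient_organizations", "### Patient Organizations",
     "| Organization | Focus | Activities |",
     "|--------------|-------|------------|",
     [["name"], ["focus"], ["activities"]]) ]

-- next((row[k] for k in ks if k in row), ""): value of first candidate key present, else ""
def bCell (row : List (String × String)) (cands : List String) : String :=
  match cands with
  | [] => ""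
  | k :: rest =>
    if (PySem.Dict.mk row).contains k then (PySem.Dict.mk row).getD k "" else bCell row rest

def format_named_entities_py_alt (entities : List (String × List (List (String × String)))) : List String :=
  let text :=
    bSections.foldl (fun text sec =>
      let (key, heading, header, sep, cols) := sec
      let rows := (PySem.Dict.mk entities).getD key []
      if rows ≠ [] then
        (rows.foldl (fun t row =>
          t ++ "\n| " ++ PySem.Str.join " | " (cols.map (fun ks => escapePipe (bCell row ks))) ++ " |")
          (text ++ ("\n" ++ heading ++ "\n\n" ++ header ++ "\n" ++ sep))) ++ "\n"
      else text)
      "## Named Entities Identified\n"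
  -- text.split("\n"): the separator is the non-empty literal "\n", so split? is always some
  (PySem.Str.split? text "\n").getD []

-- ===== PRECONDITION & SPEC =====
def Spec_format_named_entities_py (entities : List (String × List (List (String × String)))) (out : List String) : Prop := out = format_named_entities_py_alt entities
instance (entities : List (String × List (List (String × String)))) (out : List String) : Decidable (Spec_format_named_entities_py entities out) := by unfold Spec_format_named_entities_py; infer_instance

-- ===== CLAIM (what is proved, stated in full; the proofs are below) =====
def Claim_equal_format_named_entities_py : Prop := ∀ (entities : List (String × List (List (String × String)))), Dom_format_named_entities_py entities → Spec_format_named_entities_py entities (format_named_entities_py entities)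

-- ===== LEMMAS AND PROOFS =====
def nlJoin (L : List String) : List Char := PySem.Chars.join ['\n'] (L.map String.toList)

theorem nlJoin_singleton (s : String) : nlJoin [s] = s.toList := by
  simp [nlJoin, PySem.Chars.join, List.intercalate]

theorem nlJoin_cons (s : String) (L : List String) (h : L ≠ []) :
    nlJoin (s :: L) = s.toList ++ '\n' :: nlJoin L := by
  cases L with
  | nil => exact absurd rfl h
  | cons x t => simp [nlJoin, PySem.Chars.join, List.intercalate]

-- pure one-pass split on '\n'
def pureSplit : List Char → List (List Char)
  | [] => [[]]
  | c :: rest => if c = '\n' then [] :: pureSplit rest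
                 else (pureSplit rest).modifyHead (fun p => c :: p)

theorem pureSplit_ne_nil (l : List Char) : pureSplit l ≠ [] := by
  induction l with
  | nil => simp [pureSplit]
  | cons c rest ih =>
    simp only [pureSplit]
    split_ifs <;> [skip; cases hrec : pureSplit rest] <;> simp_all [List.modifyHead]

theorem go_spec (fuel : Nat) : ∀ (l cur : List Char) (acc : List (List Char)),
    l.length < fuel →
    PySem.Chars.splitOn.go ['\n'] fuel l cur acc
      = acc.reverse ++ (pureSplit l).modifyHead (fun p => cur.reverse ++ p) := by
  induction fuel with
  | zero => intro l cur acc h; exact absurd h (Nat.not_lt_zero _)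
  | succ fuel ih =>
    intro l cur acc h
    cases l with
    | nil => simp [PySem.Chars.splitOn.go, pureSplit]
    | cons c rest =>
      rw [PySem.Chars.splitOn.go.eq_def]
      by_cases hc : c = '\n'
      · subst hc
        have hp : ['\n'].isPrefixOf ('\n' :: rest) = true := by simp [List.isPrefixOf]
        simp only [hp, if_pos, List.length_cons, List.drop_succ_cons,
          List.drop_zero, List.length_nil]
        rw [ih rest [] (cur.reverse :: acc) (by simpa using Nat.lt_of_succ_lt_succ h)]
        cases hps : pureSplit rest with
        | nil => exact absurd hps (pureSplit_ne_nil rest)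
        | cons p ps => simp [pureSplit, List.modifyHead, hps]
      · have hp : ['\n'].isPrefixOf (c :: rest) = false := by
          simp [List.isPrefixOf]
          exact fun hh => absurd hh.symm hc
        simp only [hp, Bool.false_eq_true, if_neg, not_false_iff]
        rw [ih rest (c :: cur) acc (by simpa using Nat.lt_of_succ_lt_succ h)]
        have hns : pureSplit rest ≠ [] := pureSplit_ne_nil rest
        cases hrec : pureSplit rest with
        | nil => exact absurd hrec hns
        | cons p ps => simp [pureSplit, hc, hrec, List.modifyHead]

theorem splitOn_eq_pureSplit (s : List Char) :
    PySem.Chars.splitOn s ['\n'] = pureSplit s := by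
  rw [PySem.Chars.splitOn, go_spec (s.length + 1) s [] [] (Nat.lt_succ_self _)]
  cases hrec : pureSplit s with
  | nil => exact absurd hrec (pureSplit_ne_nil s)
  | cons p ps => simp [List.modifyHead]

theorem pureSplit_no_nl (l : List Char) (h : '\n' ∉ l) : pureSplit l = [l] := by
  induction l with
  | nil => rfl
  | cons c rest ih =>
    have hc : c ≠ '\n' := fun hh => h (hh ▸ List.mem_cons_self ..)
    simp [pureSplit, hc, ih (fun hm => h (List.mem_cons_of_mem _ hm)), List.modifyHead]

theorem pureSplit_chunk (l rest : List Char) (h : '\n' ∉ l) :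
    pureSplit (l ++ '\n' :: rest) = l :: pureSplit rest := by
  induction l with
  | nil => simp [pureSplit]
  | cons c t ih =>
    have hc : c ≠ '\n' := fun hh => h (hh ▸ List.mem_cons_self ..)
    simp [pureSplit, hc, ih (fun hm => h (List.mem_cons_of_mem _ hm)), List.modifyHead]

theorem splitOn_nlJoin (L : List String) (hne : L ≠ []) (hnl : ∀ s ∈ L, '\n' ∉ s.toList) :
    PySem.Chars.splitOn (nlJoin L) ['\n'] = L.map String.toList := by
  induction L with
  | nil => exact absurd rfl hne
  | cons s L ih =>
    cases L with
    | nil =>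
      rw [nlJoin_singleton, splitOn_eq_pureSplit,
        pureSplit_no_nl _ (hnl s (List.mem_cons_self ..))]
      rfl
    | cons x t =>
      rw [nlJoin_cons s _ (by simp), splitOn_eq_pureSplit,
        pureSplit_chunk _ _ (hnl s (List.mem_cons_self ..)), ← splitOn_eq_pureSplit,
        ih (by simp) (fun u hu => hnl u (List.mem_cons_of_mem _ hu))]
      rfl

theorem split_nlJoin (L : List String) (hne : L ≠ []) (hnl : ∀ s ∈ L, '\n' ∉ s.toList)
    (t : String) (ht : t.toList = nlJoin L) :
    (PySem.Str.split? t "\n").getD [] = L := by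
  have hsep : ("\n" : String).toList = ['\n'] := rfl
  simp only [PySem.Str.split?, PySem.Chars.split?, hsep]
  simp [ht, splitOn_nlJoin L hne hnl, List.map_map, Function.comp_def]

theorem replace_go_no_nl (fuel : Nat) : ∀ (l acc : List Char),
    l.length ≤ fuel → '\n' ∉ acc →
    '\n' ∉ PySem.Chars.replace.go ['\n'] [' '] fuel l acc := by
  induction fuel with
  | zero =>
    intro l acc hf ha
    have : l = [] := List.eq_nil_of_length_eq_zero (Nat.le_zero.mp hf)
    subst this
    rw [PySem.Chars.replace.go.eq_def]
    simpa using ha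
  | succ fuel ih =>
    intro l acc hf ha
    cases l with
    | nil =>
      rw [PySem.Chars.replace.go.eq_def]
      simpa using ha
    | cons c rest =>
      rw [PySem.Chars.replace.go.eq_def]
      by_cases hc : c = '\n'
      · subst hc
        have hp : ['\n'].isPrefixOf ('\n' :: rest) = true := by simp [List.isPrefixOf]
        simp only [hp, if_pos, List.length_cons, List.drop_succ_cons, List.drop_zero,
          List.length_nil]
        exact ih rest _ (by simpa using Nat.le_of_succ_le_succ hf) (by simpa using ha)
      · have hp : ['\n'].isPrefixOf (c :: rest) = false := by
          simp [List.isPrefixOf]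
          exact fun hh => absurd hh.symm hc
        simp only [hp, Bool.false_eq_true, if_neg, not_false_iff]
        exact ih rest _ (by simpa using Nat.le_of_succ_le_succ hf)
          (by simp [ha]; exact fun hh => absurd hh.symm hc)

theorem escapePipe_no_nl (t : String) : '\n' ∉ (escapePipe t).toList := by
  rw [escapePipe, PySem.Str.toList_replace, PySem.Chars.replace]
  have : (("\n" : String).toList.isEmpty) = false := rfl
  rw [if_neg (by simp)]
  exact replace_go_no_nl _ _ [] (by simp) (by simp)

-- B's string-accumulating row loop, read on the character-list side
theorem foldl_str {α : Type} (g : α → String) (rows : List α) (t : String) :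
    (rows.foldl (fun t r => t ++ "\n| " ++ g r ++ " |") t).toList
      = t.toList ++ (rows.map (fun r => '\n' :: ("| " ++ g r ++ " |").toList)).flatten := by
  induction rows generalizing t with
  | nil => simp
  | cons a rest ih =>
    rw [List.foldl_cons, ih]
    simp [String.toList_append]

-- nlJoin over A's appended row block
theorem nlJoin_map_append {α : Type} (f : α → String) (rows : List α) (rest : List String)
    (h : rest ≠ []) :
    nlJoin (rows.map f ++ rest)
      = (rows.map (fun r => (f r).toList ++ ['\n'])).flatten ++ nlJoin rest := by
  induction rows with
  | nil => simp
  | cons a t ih =>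
    have hne : t.map f ++ rest ≠ [] := by simp [h]
    rw [List.map_cons, List.cons_append, nlJoin_cons _ _ hne, ih]
    simp

-- move the per-row '\n' from the front of each B row to the back of each A row
theorem flatten_shift {α : Type} (X : α → List Char) (rows : List α) (rest : List Char) :
    (rows.map (fun r => '\n' :: X r)).flatten ++ '\n' :: rest
      = '\n' :: ((rows.map (fun r => X r ++ ['\n'])).flatten ++ rest) := by
  induction rows with
  | nil => simp
  | cons a t ih => simp [ih]

theorem nlJoin_append (L L' : List String) (h : L ≠ []) (h' : L' ≠ []) :
    nlJoin (L ++ L') = nlJoin L ++ '\n' :: nlJoin L' := by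
  induction L with
  | nil => exact absurd rfl h
  | cons s t ih =>
    cases t with
    | nil => rw [List.singleton_append, nlJoin_cons s L' h', nlJoin_singleton]
    | cons x u =>
      rw [List.cons_append, nlJoin_cons s _ (by simp), nlJoin_cons s _ (by simp),
        ih (by simp)]
      simp

theorem no_nl_append {x y : String} (hx : '\n' ∉ x.toList) (hy : '\n' ∉ y.toList) :
    '\n' ∉ (x ++ y).toList := by
  simp only [String.toList_append, List.mem_append]
  tauto

-- per-section accumulator (A's list form)
def secL {α : Type} (rows : List α) (f : α → String) (H1 H2 H3 : String) (L : List String) : List String :=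
  if rows ≠ [] then
    (rows.foldl (fun acc r => acc ++ ["| " ++ f r ++ " |"]) (L ++ [H1, "", H2, H3])) ++ [""]
  else L

-- per-section accumulator (B's string form)
def secT {α : Type} (rows : List α) (f : α → String) (H1 H2 H3 : String) (t : String) : String :=
  if rows ≠ [] then
    (rows.foldl (fun t r => t ++ "\n| " ++ f r ++ " |") (t ++ ("\n" ++ H1 ++ "\n\n" ++ H2 ++ "\n" ++ H3))) ++ "\n"
  else t

def PVInv (L : List String) (t : String) : Prop :=
  L ≠ [] ∧ (∀ s ∈ L, '\n' ∉ s.toList) ∧ t.toList = nlJoin L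

theorem sec_ok {α : Type} (rows : List α) (f : α → String) (H1 H2 H3 : String)
    (hH1 : '\n' ∉ H1.toList) (hH2 : '\n' ∉ H2.toList) (hH3 : '\n' ∉ H3.toList)
    (hf : ∀ r, '\n' ∉ (f r).toList)
    (L : List String) (t : String) (h : PVInv L t) :
    PVInv (secL rows f H1 H2 H3 L) (secT rows f H1 H2 H3 t) := by
  obtain ⟨hL, hnl, ht⟩ := h
  by_cases hr : rows = []
  · simpa [secL, secT, hr] using ⟨hL, hnl, ht⟩
  · rw [secL, secT, if_pos hr, if_pos hr, PySem.List.foldl_append_singleton_eq_map]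
    refine ⟨by simp, ?_, ?_⟩
    · intro s hs
      simp only [List.append_assoc, List.cons_append, List.nil_append, List.mem_append,
        List.mem_cons, List.mem_map, List.not_mem_nil, or_false] at hs
      rcases hs with h | h | h | h | h | ⟨r, _, rfl⟩ | h
      · exact hnl s h
      · subst h; exact hH1
      · subst h; decide
      · subst h; exact hH2
      · subst h; exact hH3
      · intro hmem
        simp only [String.toList_append, List.mem_append] at hmem
        rcases hmem with (h | h) | h
        exacts [absurd h (by decide), hf r h, absurd h (by decide)]
      · subst h; decide
    · rw [String.toList_append, foldl_str, String.toList_append]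
      conv_rhs => rw [List.append_assoc, List.append_assoc]
      rw [nlJoin_append L _ hL (by simp)]
      simp only [List.cons_append, List.nil_append]
      rw [nlJoin_cons H1 _ (by simp), nlJoin_cons "" _ (by simp), nlJoin_cons H2 _ (by simp),
        nlJoin_cons H3 _ (by simp),
        nlJoin_map_append (fun r => "| " ++ f r ++ " |") rows [""] (by simp), nlJoin_singleton]
      rw [ht]
      have e1 : (("\n" ++ H1 ++ "\n\n" ++ H2 ++ "\n" ++ H3) : String).toList
          = '\n' :: (H1.toList ++ '\n' :: '\n' :: (H2.toList ++ '\n' :: H3.toList)) := by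
        simp [String.toList_append]
      have e2 : (("\n" : String)).toList = ['\n'] := rfl
      rw [e1, e2, List.append_assoc, flatten_shift]
      simp [String.toList_append]

-- join on the two fixed column counts
theorem join4 (a b c d : String) :
    PySem.Str.join " | " [a, b, c, d] = a ++ " | " ++ b ++ " | " ++ c ++ " | " ++ d := by
  apply String.toList_injective
  simp [PySem.Str.join, PySem.Chars.join, List.intercalate, List.intersperse]

theorem join3 (a b c : String) :
    PySem.Str.join " | " [a, b, c] = a ++ " | " ++ b ++ " | " ++ c := by
  apply String.toList_injective
  simp [PySem.Str.join, PySem.Chars.join, List.intercalate, List.intersperse]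

-- a one-candidate column is a plain .get(k, '')
theorem bCell_one (row : List (String × String)) (k : String) :
    bCell row [k] = aGet row k "" := by
  simp only [bCell, aGet]
  rcases h : (PySem.Dict.mk row).get? k with _ | v <;>
    simp [PySem.Dict.getD_eq_get?_getD, PySem.Dict.contains_eq_isSome_get?, h]

-- a two-candidate column is the nested .get(k, row.get(k', ''))
theorem bCell_two (row : List (String × String)) (k k' : String) :
    bCell row [k, k'] = aGet row k (aGet row k' "") := by
  simp only [bCell, aGet]
  rcases h : (PySem.Dict.mk row).get? k with _ | v
  · rcases h' : (PySem.Dict.mk row).get? k' with _ | w <;>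
      simp [PySem.Dict.getD_eq_get?_getD, PySem.Dict.contains_eq_isSome_get?, h, h']
  · simp [PySem.Dict.getD_eq_get?_getD, PySem.Dict.contains_eq_isSome_get?, h]

theorem row4_no_nl (a b c d : String) :
    '\n' ∉ (escapePipe a ++ " | " ++ escapePipe b ++ " | " ++ escapePipe c ++ " | " ++ escapePipe d).toList := by
  refine no_nl_append (no_nl_append (no_nl_append (no_nl_append (no_nl_append
    (no_nl_append (escapePipe_no_nl a) ?_) (escapePipe_no_nl b)) ?_)
    (escapePipe_no_nl c)) ?_) (escapePipe_no_nl d) <;> decide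

theorem row3_no_nl (a b c : String) :
    '\n' ∉ (escapePipe a ++ " | " ++ escapePipe b ++ " | " ++ escapePipe c).toList := by
  refine no_nl_append (no_nl_append (no_nl_append (no_nl_append
    (escapePipe_no_nl a) ?_) (escapePipe_no_nl b)) ?_) (escapePipe_no_nl c) <;> decide

-- A as five applications of the generic section step secL
set_option maxHeartbeats 1600000 in
theorem A_eq (entities : List (String × List (List (String × String)))) :
    format_named_entities_py entities =
      secL ((PySem.Dict.mk entities).getD "patient_organizations" [])
        (fun org => escapePipe (aGet org "name" "") ++ " | " ++ escapePipe (aGet org "focus" "") ++ " | " ++ escapePipe (aGet org "activities" ""))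
        "### Patient Organizations" "| Organization | Focus | Activities |" "|--------------|-------|------------|"
      (secL ((PySem.Dict.mk entities).getD "professional_societies" [])
        (fun soc => escapePipe (aGet soc "name" "") ++ " | " ++ escapePipe (aGet soc "abbreviation" "") ++ " | " ++ escapePipe (aGet soc "focus" ""))
        "### Professional Societies" "| Organization | Abbreviation | Focus |" "|--------------|--------------|-------|"
      (secL ((PySem.Dict.mk entities).getD "payer_bodies" [])
        (fun payer => escapePipe (aGet payer "name" "") ++ " | " ++ escapePipe (aGet payer "role" "") ++ " | " ++ escapePipe (aGet payer "decisions" ""))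
        "### Payer Bodies" "| Organization | Role | Key Decisions |" "|--------------|------|---------------|"
      (secL ((PySem.Dict.mk entities).getD "institutions" [])
        (fun inst => escapePipe (aGet inst "name" "") ++ " | " ++ escapePipe (aGet inst "location" "") ++ " | " ++ escapePipe (aGet inst "type" "") ++ " | " ++ escapePipe (aGet inst "specialization" ""))
        "### Institutions" "| Name | Location | Type | Specialization |" "|------|----------|------|----------------|"
      (secL ((PySem.Dict.mk entities).getD "kols" [])
        (fun kol => escapePipe (aGet kol "name" "") ++ " | " ++ escapePipe (aGet kol "institution" "") ++ " | " ++ escapePipe (aGet kol "role" (aGet kol "position" "")) ++ " | " ++ escapePipe (aGet kol "expertise" (aGet kol "specialty" "")))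
        "### Key Opinion Leaders" "| Name | Institution | Role | Expertise |" "|------|-------------|------|-----------|"
      ["## Named Entities Identified", ""])))) := by
  unfold format_named_entities_py secL
  simp only [String.append_assoc]

-- B as five applications of the generic section step secT, split at the end
set_option maxHeartbeats 1600000 in
theorem B_eq (entities : List (String × List (List (String × String)))) :
    format_named_entities_py_alt entities =
      (PySem.Str.split?
        (secT ((PySem.Dict.mk entities).getD "patient_organizations" [])
          (fun org => escapePipe (aGet org "name" "") ++ " | " ++ escapePipe (aGet org "focus" "") ++ " | " ++ escapePipe (aGet org "activities" ""))
          "### Patient Organizations" "| Organization | Focus | Activities |" "|--------------|-------|------------|"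
        (secT ((PySem.Dict.mk entities).getD "professional_societies" [])
          (fun soc => escapePipe (aGet soc "name" "") ++ " | " ++ escapePipe (aGet soc "abbreviation" "") ++ " | " ++ escapePipe (aGet soc "focus" ""))
          "### Professional Societies" "| Organization | Abbreviation | Focus |" "|--------------|--------------|-------|"
        (secT ((PySem.Dict.mk entities).getD "payer_bodies" [])
          (fun payer => escapePipe (aGet payer "name" "") ++ " | " ++ escapePipe (aGet payer "role" "") ++ " | " ++ escapePipe (aGet payer "decisions" ""))
          "### Payer Bodies" "| Organization | Role | Key Decisions |" "|--------------|------|---------------|"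
        (secT ((PySem.Dict.mk entities).getD "institutions" [])
          (fun inst => escapePipe (aGet inst "name" "") ++ " | " ++ escapePipe (aGet inst "location" "") ++ " | " ++ escapePipe (aGet inst "type" "") ++ " | " ++ escapePipe (aGet inst "specialization" ""))
          "### Institutions" "| Name | Location | Type | Specialization |" "|------|----------|------|----------------|"
        (secT ((PySem.Dict.mk entities).getD "kols" [])
          (fun kol => escapePipe (aGet kol "name" "") ++ " | " ++ escapePipe (aGet kol "institution" "") ++ " | " ++ escapePipe (aGet kol "role" (aGet kol "position" "")) ++ " | " ++ escapePipe (aGet kol "expertise" (aGet kol "specialty" "")))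
          "### Key Opinion Leaders" "| Name | Institution | Role | Expertise |" "|------|-------------|------|-----------|"
        "## Named Entities Identified\n"))))) "\n").getD [] := by
  unfold format_named_entities_py_alt secT bSections
  simp only [List.foldl_cons, List.foldl_nil, List.map_cons, List.map_nil,
    join4, join3, bCell_one, bCell_two, String.append_assoc]

-- ===== VERDICT (by name: the statement is the Claim_ definition above) =====
set_option maxHeartbeats 1600000 in
theorem format_named_entities_py_spec : Claim_equal_format_named_entities_py := by
  intro entities _
  unfold Spec_format_named_entities_py
  rw [A_eq entities, B_eq entities]
  have h0 : PVInv ["## Named Entities Identified", ""] "## Named Entities Identified\n" := by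
    unfold PVInv
    refine ⟨by simp, ?_, by decide⟩
    intro s hs
    rcases List.mem_cons.mp hs with rfl | hs'
    · decide
    · rcases List.mem_cons.mp hs' with rfl | hs''
      · decide
      · exact absurd hs'' (List.not_mem_nil)
  have h1 := sec_ok ((PySem.Dict.mk entities).getD "kols" [])
    (fun kol => escapePipe (aGet kol "name" "") ++ " | " ++ escapePipe (aGet kol "institution" "") ++ " | " ++ escapePipe (aGet kol "role" (aGet kol "position" "")) ++ " | " ++ escapePipe (aGet kol "expertise" (aGet kol "specialty" "")))
    "### Key Opinion Leaders" "| Name | Institution | Role | Expertise |" "|------|-------------|------|-----------|"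
    (by decide) (by decide) (by decide) (fun kol => row4_no_nl _ _ _ _) _ _ h0
  have h2 := sec_ok ((PySem.Dict.mk entities).getD "institutions" [])
    (fun inst => escapePipe (aGet inst "name" "") ++ " | " ++ escapePipe (aGet inst "location" "") ++ " | " ++ escapePipe (aGet inst "type" "") ++ " | " ++ escapePipe (aGet inst "specialization" ""))
    "### Institutions" "| Name | Location | Type | Specialization |" "|------|----------|------|----------------|"
    (by decide) (by decide) (by decide) (fun inst => row4_no_nl _ _ _ _) _ _ h1
  have h3 := sec_ok ((PySem.Dict.mk entities).getD "payer_bodies" [])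
    (fun payer => escapePipe (aGet payer "name" "") ++ " | " ++ escapePipe (aGet payer "role" "") ++ " | " ++ escapePipe (aGet payer "decisions" ""))
    "### Payer Bodies" "| Organization | Role | Key Decisions |" "|--------------|------|---------------|"
    (by decide) (by decide) (by decide) (fun payer => row3_no_nl _ _ _) _ _ h2
  have h4 := sec_ok ((PySem.Dict.mk entities).getD "professional_societies" [])
    (fun soc => escapePipe (aGet soc "name" "") ++ " | " ++ escapePipe (aGet soc "abbreviation" "") ++ " | " ++ escapePipe (aGet soc "focus" ""))
    "### Professional Societies" "| Organization | Abbreviation | Focus |" "|--------------|--------------|-------|"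
    (by decide) (by decide) (by decide) (fun soc => row3_no_nl _ _ _) _ _ h3
  have h5 := sec_ok ((PySem.Dict.mk entities).getD "patient_organizations" [])
    (fun org => escapePipe (aGet org "name" "") ++ " | " ++ escapePipe (aGet org "focus" "") ++ " | " ++ escapePipe (aGet org "activities" ""))
    "### Patient Organizations" "| Organization | Focus | Activities |" "|--------------|-------|------------|"
    (by decide) (by decide) (by decide) (fun org => row3_no_nl _ _ _) _ _ h4
  unfold PVInv at h5
  exact Eq.symm (split_nlJoin _ h5.1 h5.2.1 _ h5.2.2)
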